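-- pv_equiv track=rewrite | github.com/malittlevina/unimind | advanced/rag_system.py | _supports_claim
-- ===== SOURCE A (Python) =====
-- def _supports_claim(claim: str, content: str) -> bool:
--     """Determine if content supports the claim."""
--     # Simple keyword-based support detection
--     claim_lower = claim.lower()
--     content_lower = content.lower()
--
--     # Look for supporting keywords
--     supporting_keywords = ['true', 'correct', 'accurate', 'verified', 'confirmed', 'proven', 'supports', 'agrees']
--
--     # Check for negation
--     negation_keywords = ['not', 'false', 'incorrect', 'wrong', 'disproven', 'contradicts', 'disagrees']
--
--     has_supporting = any(keyword in content_lower for keyword in supporting_keywords)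
--     has_negation = any(keyword in content_lower for keyword in negation_keywords)
--
--     return has_supporting and not has_negation
-- ===== SOURCE B (Python) =====
-- SUPPORTING = ('true', 'correct', 'accurate', 'verified', 'confirmed', 'proven', 'supports', 'agrees')
-- NEGATION = ('not', 'false', 'incorrect', 'wrong', 'disproven', 'contradicts', 'disagrees')
--
--
-- def _supports_claim(claim: str, content: str) -> bool:
--     """Determine if content supports the claim."""
--     text = content.lower()
--     supported = False
--     for i in range(len(text)):
--         if text.startswith(NEGATION, i):
--             return False
--         supported = supported or text.startswith(SUPPORTING, i)
--     return supported
-- ===== Notes on version B (the rewrite author's own statement) =====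
-- stated objective: alternative
-- what changed: Replaces the 15 independent per-keyword substring scans with a single index-based left-to-right pass that checks all keywords at each position via tuple startswith and exits early on the first negation hit.
import Mathlib
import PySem

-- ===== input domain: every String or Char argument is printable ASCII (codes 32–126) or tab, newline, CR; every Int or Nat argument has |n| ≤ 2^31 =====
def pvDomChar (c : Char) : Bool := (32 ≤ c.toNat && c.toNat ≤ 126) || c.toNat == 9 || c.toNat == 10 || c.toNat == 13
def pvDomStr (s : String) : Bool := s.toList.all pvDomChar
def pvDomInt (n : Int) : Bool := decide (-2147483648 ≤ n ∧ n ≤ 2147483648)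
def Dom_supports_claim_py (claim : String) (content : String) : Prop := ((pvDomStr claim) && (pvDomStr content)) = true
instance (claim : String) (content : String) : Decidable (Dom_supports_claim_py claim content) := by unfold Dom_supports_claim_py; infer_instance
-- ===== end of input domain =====

-- B replaces A's fifteen independent per-keyword substring scans by one index-based
-- left-to-right pass that checks all keywords at each position and exits early on the
-- first negation hit (objective: alternative; same asymptotic cost).

-- ===== PORT A =====
def supports_claim_py (claim : String) (content : String) : Bool :=
  let _claim_lower := PySem.Str.lower claim
  let content_lower := PySem.Str.lower content
  let supporting_keywords : List String :=
    ["true", "correct", "accurate", "verified", "confirmed", "proven", "supports", "agrees"]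
  let negation_keywords : List String :=
    ["not", "false", "incorrect", "wrong", "disproven", "contradicts", "disagrees"]
  let has_supporting := supporting_keywords.any (fun k => PySem.Str.isIn k content_lower)
  let has_negation := negation_keywords.any (fun k => PySem.Str.isIn k content_lower)
  has_supporting && !has_negation

-- ===== PORT B =====
def pvSupKw : List String :=
  ["true", "correct", "accurate", "verified", "confirmed", "proven", "supports", "agrees"]
def pvNegKw : List String :=
  ["not", "false", "incorrect", "wrong", "disproven", "contradicts", "disagrees"]

-- Source B's for-loop over positions i of text, as structural recursion over the suffixes
-- (text.startswith(KWS, i) = the suffix at i starts with one of the keywords)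
def pvScanB (sup : Bool) (cs : List Char) : Bool :=
  match cs with
  | [] => sup
  | _ :: t =>
    if pvNegKw.any (fun k => PySem.Chars.startswith cs k.toList) then false
    else pvScanB (sup || pvSupKw.any (fun k => PySem.Chars.startswith cs k.toList)) t

def supports_claim_py_alt (claim : String) (content : String) : Bool :=
  pvScanB false (PySem.Str.lower content).toList

-- ===== PRECONDITION & SPEC =====
def Spec_supports_claim_py (claim : String) (content : String) (out : Bool) : Prop := out = supports_claim_py_alt claim content
instance (claim : String) (content : String) (out : Bool) : Decidable (Spec_supports_claim_py claim content out) := by unfold Spec_supports_claim_py; infer_instance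

-- ===== CLAIM (what is proved, stated in full; the proofs are below) =====
def Claim_equal_supports_claim_py : Prop := ∀ (claim : String) (content : String), Dom_supports_claim_py claim content → Spec_supports_claim_py claim content (supports_claim_py claim content)

-- ===== LEMMAS AND PROOFS =====

lemma pvScanB_spec (cs : List Char) (sup : Bool) :
    pvScanB sup cs =
      ((sup || pvSupKw.any (fun k => PySem.Chars.isIn k.toList cs)) &&
        !(pvNegKw.any (fun k => PySem.Chars.isIn k.toList cs))) := by
  induction cs generalizing sup with
  | nil => unfold pvScanB; cases sup <;> decide
  | cons c t ih =>
      rw [pvScanB.eq_def]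
      dsimp only
      split_ifs with h
      · obtain ⟨k, hk, hpre⟩ := List.any_eq_true.mp h
        have hin : PySem.Chars.isIn k.toList (c :: t) = true :=
          (PySem.Chars.isIn_iff_infix _ _).mpr ((PySem.Chars.startswith_iff _ _).mp hpre).isInfix
        have hne : pvNegKw.any (fun k => PySem.Chars.isIn k.toList (c :: t)) = true :=
          List.any_eq_true.mpr ⟨k, hk, hin⟩
        simp [hne]
      · rw [ih, Bool.eq_iff_iff]
        simp only [List.any_eq_true, PySem.Chars.startswith_iff] at h
        push Not at h
        simp only [Bool.and_eq_true, Bool.not_eq_true', Bool.or_eq_true, List.any_eq_true,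
          List.any_eq_false, PySem.Chars.isIn_iff_infix, PySem.Chars.startswith_iff,
          List.infix_cons_iff]
        constructor
        · rintro ⟨hs, hn⟩
          refine ⟨?_, fun k hk => ?_⟩
          · rcases hs with (hs | ⟨k, hk, hi⟩) | ⟨k, hk, hp⟩
            · exact Or.inl hs
            · exact Or.inr ⟨k, hk, Or.inl hi⟩
            · exact Or.inr ⟨k, hk, Or.inr hp⟩
          · exact fun hor => hor.elim (h k hk) (hn k hk)
        · rintro ⟨hs, hn⟩
          refine ⟨?_, fun k hk => fun hi => hn k hk (Or.inr hi)⟩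
          rcases hs with hs | ⟨k, hk, hor⟩
          · exact Or.inl (Or.inl hs)
          · rcases hor with hp | hi
            · exact Or.inl (Or.inr ⟨k, hk, hp⟩)
            · exact Or.inr ⟨k, hk, hi⟩

-- ===== VERDICT (by name: the statement is the Claim_ definition above) =====
theorem supports_claim_py_spec : Claim_equal_supports_claim_py := by
  intro claim content _
  unfold Spec_supports_claim_py supports_claim_py supports_claim_py_alt
  rw [pvScanB_spec]
  simp [pvSupKw, pvNegKw, PySem.Str.isIn]
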